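-- pv_equiv track=rewrite | github.com/aayush2789/FlakeForge | server/FlakeForge_environment.py | _repeat_tail_count
-- ===== SOURCE A (Python) =====
-- from typing import Any, Dict, List, Optional, Tuple
--
-- def _repeat_tail_count(actions: List[str]) -> int:
--     if not actions:
--         return 0
--     tail = actions[-1]
--     count = 0
--     for action in reversed(actions):
--         if action == tail:
--             count += 1
--         else:
--             break
--     return count
-- ===== SOURCE B (Python) =====
-- from itertools import groupby
-- from typing import List
--
-- def _repeat_tail_count(actions: List[str]) -> int:
--     lengths = [len(list(group)) for _, group in groupby(actions)]
--     return lengths[-1] if lengths else 0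
-- ===== Notes on version B (the rewrite author's own statement) =====
-- stated objective: idiomatic
-- what changed: Replaced A's reverse scan-with-break by a forward itertools.groupby pass that materializes all run lengths and returns the last one.
import Mathlib
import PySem

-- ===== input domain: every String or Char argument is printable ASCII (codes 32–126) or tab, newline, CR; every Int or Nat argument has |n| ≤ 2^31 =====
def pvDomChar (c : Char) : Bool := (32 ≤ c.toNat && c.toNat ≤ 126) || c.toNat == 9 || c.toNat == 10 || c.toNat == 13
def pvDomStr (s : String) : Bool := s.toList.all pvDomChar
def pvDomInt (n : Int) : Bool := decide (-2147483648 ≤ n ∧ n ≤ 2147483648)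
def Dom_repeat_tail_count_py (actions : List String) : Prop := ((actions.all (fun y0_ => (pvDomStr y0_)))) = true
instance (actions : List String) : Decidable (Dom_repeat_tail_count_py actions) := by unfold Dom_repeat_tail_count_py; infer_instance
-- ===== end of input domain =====

-- B replaces A's reverse scan-with-break by a forward groupby-style pass over runs (idiomatic; same return value).


-- ===== PORT A =====
-- the 'for action in reversed(actions): if action == tail: count += 1 else: break' loop
def pvALoop (tail : String) : List String → Int → Int
  | [], count => count
  | a :: rest, count => if a == tail then pvALoop tail rest (count + 1) else count

def repeat_tail_count_py (actions : List String) : Int :=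
  if actions.isEmpty then 0
  else
    -- actions[-1]; the list is nonempty here, so the default "" is never used
    let tail := (PySem.List.pyGet? actions (-1)).getD ""
    pvALoop tail actions.reverse 0

-- ===== PORT B =====
-- itertools.groupby: forward pass producing the length of each maximal run of equal elements
def pvRunLengths : String → Int → List String → List Int
  | _, cnt, [] => [cnt]
  | key, cnt, b :: rest =>
      if b == key then pvRunLengths key (cnt + 1) rest
      else cnt :: pvRunLengths b 1 rest

def repeat_tail_count_py_alt (actions : List String) : Int :=
  let lengths : List Int := match actions with
    | [] => []
    | a :: rest => pvRunLengths a 1 rest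
  -- 'lengths[-1] if lengths else 0'
  (PySem.List.pyGet? lengths (-1)).getD 0

-- ===== PRECONDITION & SPEC =====
def Spec_repeat_tail_count_py (actions : List String) (out : Int) : Prop := out = repeat_tail_count_py_alt actions
instance (actions : List String) (out : Int) : Decidable (Spec_repeat_tail_count_py actions out) := by unfold Spec_repeat_tail_count_py; infer_instance

-- ===== CLAIM (what is proved, stated in full; the proofs are below) =====
def Claim_equal_repeat_tail_count_py : Prop := ∀ (actions : List String), Dom_repeat_tail_count_py actions → Spec_repeat_tail_count_py actions (repeat_tail_count_py actions)

-- ===== LEMMAS AND PROOFS =====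

-- prefix count: length of the maximal equal-to-tail prefix
def pvPfx (tail : String) : List String → Int
  | [] => 0
  | a :: rest => if a == tail then 1 + pvPfx tail rest else 0

theorem pvALoop_eq_pfx (tail : String) (l : List String) :
    ∀ c, pvALoop tail l c = c + pvPfx tail l := by
  induction l with
  | nil => intro c; simp [pvALoop, pvPfx]
  | cons a rest ih =>
      intro c
      by_cases h : a == tail
      · simp [pvALoop, pvPfx, h, ih]; ring
      · simp [pvALoop, pvPfx, h]

theorem pvPfx_append_all (tail : String) (xs ys : List String)
    (h : xs.all (· == tail) = true) :
    pvPfx tail (xs ++ ys) = xs.length + pvPfx tail ys := by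
  induction xs with
  | nil => simp
  | cons a rest ih =>
      simp only [List.all_cons, Bool.and_eq_true] at h
      simp [pvPfx, h.1, ih h.2]; ring

theorem pvPfx_append_not_all (tail : String) (xs ys : List String)
    (h : ¬ xs.all (· == tail) = true) :
    pvPfx tail (xs ++ ys) = pvPfx tail xs := by
  induction xs with
  | nil => simp at h
  | cons a rest ih =>
      simp only [List.all_cons, Bool.and_eq_true] at h
      by_cases ha : a == tail
      · simp [pvPfx, ha, ih (by tauto)]
      · simp [pvPfx, ha]

theorem pvPfx_all (tail : String) (xs : List String)
    (h : xs.all (· == tail) = true) :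
    pvPfx tail xs = xs.length := by
  have := pvPfx_append_all tail xs [] h
  simpa [pvPfx] using this

theorem pvAll_reverse (tail : String) (l : List String) :
    l.reverse.all (· == tail) = l.all (· == tail) := by
  simp

theorem pvRunLengths_ne_nil (key : String) (cnt : Int) (l : List String) :
    pvRunLengths key cnt l ≠ [] := by
  cases l with
  | nil => simp [pvRunLengths]
  | cons b rest =>
      by_cases h : b == key <;> simp [pvRunLengths, h]
      exact pvRunLengths_ne_nil _ _ _

theorem pvGetLastD_ne_nil {α : Type} (l : List α) (d d' : α) (h : l ≠ []) :
    l.getLastD d = l.getLastD d' := by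
  rw [List.getLastD_eq_getLast?, List.getLastD_eq_getLast?,
      List.getLast?_eq_some_getLast h]
  simp

theorem pvGetLastD_all (b : String) (l : List String) (hne : l ≠ [])
    (h : l.all (· == b) = true) : l.getLastD "" = b := by
  rw [List.getLastD_eq_getLast?, List.getLast?_eq_some_getLast hne]
  simp only [List.all_eq_true] at h
  have := h _ (List.getLast_mem hne)
  simpa using this

-- dropping the head of the list does not change the tail-run count when the head's run does not reach the tail
theorem pvPfx_rev_snoc (b : String) (rest : List String)
    (h : ¬ rest.all (· == b) = true) :
    pvPfx ((b :: rest).getLastD "") ((b :: rest).reverse) =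
      pvPfx (rest.getLastD "") rest.reverse := by
  have hne : rest ≠ [] := by intro he; subst he; simp at h
  have hlast : (b :: rest).getLastD "" = rest.getLastD "" := by
    rw [List.getLastD_cons]; exact pvGetLastD_ne_nil rest b "" hne
  have hrev : (b :: rest).reverse = rest.reverse ++ [b] := by simp
  rw [hlast, hrev]
  set t := rest.getLastD "" with ht
  by_cases hra : rest.reverse.all (· == t) = true
  · have hall : rest.all (· == t) = true := by rw [← pvAll_reverse]; exact hra
    have htb : ¬ (b == t) = true := by
      intro hbt
      have : b = t := by simpa using hbt
      exact h (this ▸ hall)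
    rw [pvPfx_append_all _ _ _ hra, pvPfx_all _ _ hra]
    simp [pvPfx, htb]
  · exact pvPfx_append_not_all _ _ _ hra

theorem pvRunLengths_last (l : List String) :
    ∀ (key : String) (cnt : Int),
      (pvRunLengths key cnt l).getLastD 0 =
        if l.all (· == key) = true then cnt + l.length
        else pvPfx (l.getLastD "") l.reverse := by
  induction l with
  | nil => intro key cnt; simp [pvRunLengths]
  | cons b rest ih =>
      intro key cnt
      by_cases hb : b == key
      · have hbk : b = key := by simpa using hb
        subst hbk
        simp only [pvRunLengths, if_pos (by simp : (b == b) = true)]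
        rw [ih]
        by_cases hall : rest.all (· == b) = true
        · have : ((b :: rest).all (· == b)) = true := by simp [List.all_cons, hall]
          simp [hall, this]; ring
        · have hcons : ¬ ((b :: rest).all (· == b)) = true := by
            simp only [List.all_cons, Bool.and_eq_true]
            intro hc; exact hall hc.2
          rw [if_neg hall, if_neg hcons, pvPfx_rev_snoc b rest hall]
      · have hcons : ¬ ((b :: rest).all (· == key)) = true := by
          simp [List.all_cons, hb]
        rw [if_neg hcons]
        have hL : (pvRunLengths key cnt (b :: rest)).getLastD 0 =
            (pvRunLengths b 1 rest).getLastD 0 := by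
          simp only [pvRunLengths, if_neg hb, List.getLastD_cons]
          exact pvGetLastD_ne_nil _ _ _ (pvRunLengths_ne_nil b 1 rest)
        rw [hL, ih]
        by_cases hall : rest.all (· == b) = true
        · rw [if_pos hall]
          have hlast : (b :: rest).getLastD "" = b := by
            apply pvGetLastD_all b _ (by simp)
            simp [List.all_cons, hall]
          have hrevall : (b :: rest).reverse.all (· == b) = true := by
            rw [pvAll_reverse]; simp [List.all_cons, hall]
          rw [hlast, pvPfx_all _ _ hrevall]
          simp; ring
        · rw [if_neg hall, pvPfx_rev_snoc b rest hall]

-- ===== VERDICT (by name: the statement is the Claim_ definition above) =====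
theorem repeat_tail_count_py_spec : Claim_equal_repeat_tail_count_py := by
  intro actions _
  unfold Spec_repeat_tail_count_py
  cases actions with
  | nil => simp [repeat_tail_count_py, repeat_tail_count_py_alt, PySem.List.pyGet?]
  | cons a rest =>
      have hA : repeat_tail_count_py (a :: rest) =
          pvPfx ((a :: rest).getLastD "") ((a :: rest).reverse) := by
        simp only [repeat_tail_count_py, List.isEmpty_cons]
        rw [if_neg (by simp), PySem.List.pyGet?_neg_one, pvALoop_eq_pfx]
        rw [List.getLast?_eq_some_getLast (l := a :: rest) (by simp),
            List.getLastD_eq_getLast?,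
            List.getLast?_eq_some_getLast (l := a :: rest) (by simp)]
        simp
      have hB : repeat_tail_count_py_alt (a :: rest) =
          (pvRunLengths a 1 rest).getLastD 0 := by
        simp only [repeat_tail_count_py_alt]
        rw [PySem.List.pyGet?_neg_one, List.getLastD_eq_getLast?]
      rw [hA, hB, pvRunLengths_last]
      by_cases hall : rest.all (· == a) = true
      · rw [if_pos hall]
        have hlast : (a :: rest).getLastD "" = a :=
          pvGetLastD_all a _ (by simp) (by simp [List.all_cons, hall])
        have hrevall : (a :: rest).reverse.all (· == a) = true := by
          rw [pvAll_reverse]; simp [List.all_cons, hall]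
        rw [hlast, pvPfx_all _ _ hrevall]
        simp; ring
      · rw [if_neg hall, pvPfx_rev_snoc a rest hall]
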